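-- pv_equiv track=rewrite | github.com/paraGONG/nand2tetris | projects/06/myassembler/Code.py | dest
-- ===== SOURCE A (Python) =====
-- def dest(instruction):
--     if '=' in instruction:
--         d = instruction.split('=')[0].strip()
--         temp = ['0','0','0']
--         for char in d:
--             if char == 'A':
--                 temp[0] = '1'
--             elif char == 'D':
--                 temp[1] = '1'
--             elif char == 'M':
--                 temp[2] = '1'
--         return ''.join(temp)
--     return '000'
-- ===== SOURCE B (Python) =====
-- def dest(instruction):
--     if '=' not in instruction:
--         return '000'
--     d = instruction.split('=')[0].strip()
--     return ''.join('1' if c in d else '0' for c in 'ADM')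
-- ===== Notes on version B (the rewrite author's own statement) =====
-- stated objective: idiomatic
-- what changed: B inverts the traversal: instead of scanning the dest field and dispatching each character into a mutable 3-slot flag list, it iterates over the fixed output alphabet 'ADM' and emits '1' or '0' per membership test, removing the accumulator.
import Mathlib
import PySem

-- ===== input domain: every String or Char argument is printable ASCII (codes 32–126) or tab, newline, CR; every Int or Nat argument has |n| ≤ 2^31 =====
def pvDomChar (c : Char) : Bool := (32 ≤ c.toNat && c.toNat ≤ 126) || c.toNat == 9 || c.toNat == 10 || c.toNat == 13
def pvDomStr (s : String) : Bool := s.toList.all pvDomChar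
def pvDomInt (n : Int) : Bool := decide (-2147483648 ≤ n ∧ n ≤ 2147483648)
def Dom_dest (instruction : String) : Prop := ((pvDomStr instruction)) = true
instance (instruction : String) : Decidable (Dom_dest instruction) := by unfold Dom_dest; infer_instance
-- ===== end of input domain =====

-- B iterates over the fixed output alphabet 'ADM' with a membership test instead of
-- scanning the dest field into a mutable 3-slot flag list (idiomatic; same cost).

-- ===== PORT A =====
-- the for-loop over d, carrying temp = [t0,t1,t2] (one-char Python strings ported as Chars)
def destLoop : List Char → Char × Char × Char → Char × Char × Char
  | [], t => t
  | c :: cs, (t0, t1, t2) =>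
    if c = 'A' then destLoop cs ('1', t1, t2)
    else if c = 'D' then destLoop cs (t0, '1', t2)
    else if c = 'M' then destLoop cs (t0, t1, '1')
    else destLoop cs (t0, t1, t2)

def dest (instruction : String) : String :=
  if PySem.Str.isIn "=" instruction then
    let d := PySem.Str.strip (((PySem.Str.split? instruction "=").getD []).headD "")
    let t := destLoop d.toList ('0', '0', '0')
    String.ofList [t.1, t.2.1, t.2.2]     -- ''.join(temp) of the three one-char strings
  else "000"

-- ===== PORT B =====
def dest_alt (instruction : String) : String :=
  if PySem.Str.isIn "=" instruction = false then "000"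
  else
    let d := PySem.Str.strip (((PySem.Str.split? instruction "=").getD []).headD "")
    -- ''.join('1' if c in d else '0' for c in 'ADM')
    String.ofList (['A', 'D', 'M'].map (fun c => if PySem.Chars.isIn [c] d.toList then '1' else '0'))

-- ===== PRECONDITION & SPEC =====
def Spec_dest (instruction : String) (out : String) : Prop := out = dest_alt instruction
instance (instruction : String) (out : String) : Decidable (Spec_dest instruction out) := by unfold Spec_dest; infer_instance

-- ===== CLAIM (what is proved, stated in full; the proofs are below) =====
def Claim_equal_dest : Prop := ∀ (instruction : String), Dom_dest instruction → Spec_dest instruction (dest instruction)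

-- ===== LEMMAS AND PROOFS =====
theorem destLoop_eq (cs : List Char) (t0 t1 t2 : Char) :
    destLoop cs (t0, t1, t2) =
      ((if 'A' ∈ cs then '1' else t0),
       (if 'D' ∈ cs then '1' else t1),
       (if 'M' ∈ cs then '1' else t2)) := by
  induction cs generalizing t0 t1 t2 with
  | nil => simp [destLoop]
  | cons c cs ih =>
    by_cases hA : c = 'A'
    · subst hA; simp [destLoop, ih]
    · by_cases hD : c = 'D'
      · subst hD; simp [destLoop, ih]
      · by_cases hM : c = 'M'
        · subst hM; simp [destLoop, ih]
        · simp [destLoop, hA, hD, hM, ih, Ne.symm hA, Ne.symm hD, Ne.symm hM]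

theorem singleton_infix_iff (c : Char) (l : List Char) : [c] <:+: l ↔ c ∈ l := by
  constructor
  · rintro ⟨s, t, rfl⟩; simp
  · intro h
    obtain ⟨s, t, rfl⟩ := List.append_of_mem h
    exact ⟨s, t, by simp⟩

theorem isIn_singleton (c : Char) (l : List Char) :
    PySem.Chars.isIn [c] l = decide (c ∈ l) := by
  by_cases h : c ∈ l
  · have : PySem.Chars.isIn [c] l = true :=
      (PySem.Chars.isIn_iff_infix [c] l).mpr ((singleton_infix_iff c l).mpr h)
    simp [this, h]
  · have : PySem.Chars.isIn [c] l = false :=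
      (PySem.Chars.isIn_eq_false_iff [c] l).mpr (fun hinf => h ((singleton_infix_iff c l).mp hinf))
    simp [this, h]

-- ===== VERDICT (by name: the statement is the Claim_ definition above) =====
theorem dest_spec : Claim_equal_dest := by
  intro instr _
  unfold Spec_dest dest dest_alt
  cases h : PySem.Str.isIn "=" instr <;>
    simp [h, destLoop_eq, isIn_singleton]
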